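-- pv_equiv track=rewrite | github.com/allensun623/LeetCode-Python | Amazon/MaxPower.py | maxPowerConsumption
-- ===== SOURCE A (Python) =====
-- from collections import deque
--
-- def maxPowerConsumption(bootingPower: list, processingPower: list, powerMax: int) -> int:
--   pq = deque()
--   res = total = i = 0
--   for j in range(len(bootingPower)):
--     total += processingPower[j]
--     # update max value in pq
--     while pq and bootingPower[pq[-1]] < bootingPower[j]:
--       pq.pop()
--     pq.append(j)
--     # left pointer moves while power > powerMax
--     if bootingPower[pq[0]] + (total) * (j - i + 1) > powerMax:
--       total -= processingPower[i]
--       i += 1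
--       while pq and pq[0] < i:
--         pq.popleft()
--
--     res = max(res, j - i + 1)
--
--   return res
-- ===== SOURCE B (Python) =====
-- def maxPowerConsumption(bootingPower: list, processingPower: list, powerMax: int) -> int:
--   # Window never shrinks (the left pointer moves at most one step per iteration),
--   # so the answer is simply len(bootingPower) - final left pointer; no res/max
--   # tracking and no deque: the window maximum is recomputed by an inner scan.
--   total = 0
--   i = 0
--   for j in range(len(bootingPower)):
--     total += processingPower[j]
--     m = bootingPower[i]
--     for k in range(i + 1, j + 1):
--       if bootingPower[k] > m:
--         m = bootingPower[k]
--     if m + total * (j - i + 1) > powerMax: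
--       total -= processingPower[i]
--       i += 1
--   return len(bootingPower) - i
-- ===== Notes on version B (the rewrite author's own statement) =====
-- stated objective: simpler
-- what changed: Deleted both the monotonic deque and the res/max accumulator: the window maximum is recomputed each step by an inner scan, and since the window never shrinks the answer is returned as len(bootingPower) minus the final left pointer.
import Mathlib
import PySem

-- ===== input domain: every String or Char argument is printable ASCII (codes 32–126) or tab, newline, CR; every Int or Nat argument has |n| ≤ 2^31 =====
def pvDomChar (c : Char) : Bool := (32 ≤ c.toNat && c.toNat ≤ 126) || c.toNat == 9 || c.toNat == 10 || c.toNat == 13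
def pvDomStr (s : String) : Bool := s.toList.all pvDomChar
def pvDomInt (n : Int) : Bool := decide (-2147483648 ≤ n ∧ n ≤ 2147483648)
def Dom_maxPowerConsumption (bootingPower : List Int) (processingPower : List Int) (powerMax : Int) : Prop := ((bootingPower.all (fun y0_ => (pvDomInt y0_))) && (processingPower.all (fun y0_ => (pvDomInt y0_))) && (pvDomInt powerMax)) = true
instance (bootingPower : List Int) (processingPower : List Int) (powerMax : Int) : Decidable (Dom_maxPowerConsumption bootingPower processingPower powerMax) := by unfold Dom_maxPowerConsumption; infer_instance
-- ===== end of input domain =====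

-- B drops A's deque AND the res accumulator: the window maximum is recomputed by an
-- inner scan and, since the window never shrinks, the answer is len - final left pointer
-- (simpler, no auxiliary structure). Return values are identical.

-- ===== PORT A =====
-- `while pq and bootingPower[pq[-1]] < bootingPower[j]: pq.pop()` — pop from the back while
-- the last value is < b[j]; transliterated as reverse / dropWhile / reverse.
def pvPopBack (b : List Int) (vj : Int) (pq : List Nat) : List Nat :=
  (pq.reverse.dropWhile (fun q => decide (b.getD q 0 < vj))).reverse

-- one iteration of A's for-loop; state (pq, res, total, i); indices are in range under Pre_
def pvStepA (b p : List Int) (pm : Int) (s : List Nat × Int × Int × Nat) (j : Nat) :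
    List Nat × Int × Int × Nat :=
  let pq := s.1
  let res := s.2.1
  let total := s.2.2.1 + p.getD j 0
  let pq := pvPopBack b (b.getD j 0) pq ++ [j]
  let i := s.2.2.2
  if b.getD (pq.headD 0) 0 + total * ((j : Int) - (i : Int) + 1) > pm then
    let total := total - p.getD i 0
    let i := i + 1
    let pq := pq.dropWhile (fun q => decide (q < i))
    (pq, max res ((j : Int) - (i : Int) + 1), total, i)
  else
    (pq, max res ((j : Int) - (i : Int) + 1), total, i)

def maxPowerConsumption (bootingPower : List Int) (processingPower : List Int) (powerMax : Int) : Int :=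
  ((List.range bootingPower.length).foldl
      (pvStepA bootingPower processingPower powerMax) ([], 0, 0, 0)).2.1

-- ===== PORT B =====
-- B's inner scan `m = b[i]; for k in range(i+1, j+1): if b[k] > m: m = b[k]`
def pvScanMax (b : List Int) (i j : Nat) : Int :=
  (List.range' (i + 1) (j - i)).foldl
    (fun m k => if b.getD k 0 > m then b.getD k 0 else m) (b.getD i 0)

-- one iteration of B's for-loop; state (total, i) only
def pvStepB (b p : List Int) (pm : Int) (s : Int × Nat) (j : Nat) : Int × Nat :=
  let total := s.1 + p.getD j 0
  let i := s.2
  if pvScanMax b i j + total * ((j : Int) - (i : Int) + 1) > pm then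
    (total - p.getD i 0, i + 1)
  else
    (total, i)

def maxPowerConsumption_alt (bootingPower : List Int) (processingPower : List Int) (powerMax : Int) : Int :=
  (bootingPower.length : Int) -
    (((List.range bootingPower.length).foldl
        (pvStepB bootingPower processingPower powerMax) (0, 0)).2 : Int)

-- ===== PRECONDITION & SPEC =====
-- Both programs index processingPower[j] for every j < len(bootingPower), so they raise
-- IndexError exactly when processingPower is shorter than bootingPower; those inputs are excluded.
def Pre_maxPowerConsumption (bootingPower : List Int) (processingPower : List Int) (powerMax : Int) : Prop :=
  bootingPower.length ≤ processingPower.length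
instance (bootingPower : List Int) (processingPower : List Int) (powerMax : Int) : Decidable (Pre_maxPowerConsumption bootingPower processingPower powerMax) := by unfold Pre_maxPowerConsumption; infer_instance

def pvWitness_maxPowerConsumption : List Int × List Int × Int := ([3, 1, 2], [2, 2, 2], 20)

def Spec_maxPowerConsumption (bootingPower : List Int) (processingPower : List Int) (powerMax : Int) (out : Int) : Prop := out = maxPowerConsumption_alt bootingPower processingPower powerMax
instance (bootingPower : List Int) (processingPower : List Int) (powerMax : Int) (out : Int) : Decidable (Spec_maxPowerConsumption bootingPower processingPower powerMax out) := by unfold Spec_maxPowerConsumption; infer_instance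

-- ===== CLAIM (what is proved, stated in full; the proofs are below) =====
def Claim_equal_maxPowerConsumption : Prop := ∀ (bootingPower : List Int) (processingPower : List Int) (powerMax : Int), Dom_maxPowerConsumption bootingPower processingPower powerMax → Pre_maxPowerConsumption bootingPower processingPower powerMax → Spec_maxPowerConsumption bootingPower processingPower powerMax (maxPowerConsumption bootingPower processingPower powerMax)

-- ===== LEMMAS AND PROOFS =====

-- loop invariant tying A's deque to the window [i, j): indices live in the window,
-- strictly increase, values are non-increasing, and every window index is dominated
-- by some deque index at or after it (so the deque head carries the window maximum).
def pvInv (b : List Int) (i j : Nat) (pq : List Nat) : Prop :=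
  i ≤ j
  ∧ (∀ q ∈ pq, i ≤ q ∧ q < j)
  ∧ pq.Pairwise (· < ·)
  ∧ pq.Pairwise (fun a c => b.getD c 0 ≤ b.getD a 0)
  ∧ ∀ k, i ≤ k → k < j → ∃ q ∈ pq, k ≤ q ∧ b.getD k 0 ≤ b.getD q 0

theorem mem_dropWhile_of_not {α : Type} (p : α → Bool) (l : List α) (x : α)
    (hx : x ∈ l) (hpx : p x = false) : x ∈ l.dropWhile p := by
  induction l with
  | nil => cases hx
  | cons a l ih =>
    rw [List.dropWhile_cons]
    rcases List.mem_cons.mp hx with rfl | hx'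
    · simp [hpx]
    · by_cases hpa : p a = true
      · simp [hpa]; exact ih hx'
      · simp [hpa]; right; exact hx'

theorem dropWhile_all {α : Type} {r : α → α → Prop} {p : α → Bool} (l : List α)
    (h : l.Pairwise r) (hstep : ∀ a c, p a = false → r a c → p c = false) :
    ∀ x ∈ l.dropWhile p, p x = false := by
  induction l with
  | nil => intro x hx; cases hx
  | cons a l ih =>
    rcases List.pairwise_cons.mp h with ⟨ha, hl⟩
    intro x hx
    rw [List.dropWhile_cons] at hx
    by_cases hpa : p a = true
    · simp [hpa] at hx; exact ih hl x hx
    · simp [hpa] at hx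
      rcases hx with rfl | hx'
      · exact eq_false_of_ne_true hpa
      · exact hstep a x (eq_false_of_ne_true hpa) (ha x hx')

theorem foldl_max_le (xs : List Int) : ∀ (x a : Int), a ∈ x :: xs → a ≤ xs.foldl max x := by
  induction xs with
  | nil => intro x a ha; simp at ha; simp [ha]
  | cons y ys ih =>
    intro x a ha
    rcases List.mem_cons.mp ha with rfl | ha'
    · calc a ≤ max a y := le_max_left _ _
        _ ≤ ys.foldl max (max a y) := ih (max a y) _ (List.mem_cons_self)
    · rcases List.mem_cons.mp ha' with rfl | ha''
      · calc a ≤ max x a := le_max_right _ _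
          _ ≤ ys.foldl max (max x a) := ih _ _ (List.mem_cons_self)
      · exact ih (max x y) a (List.mem_cons.mpr (Or.inr ha''))

theorem foldl_max_mem (xs : List Int) : ∀ x : Int, xs.foldl max x ∈ x :: xs := by
  induction xs with
  | nil => intro x; simp
  | cons y ys ih =>
    intro x
    rw [List.foldl_cons]
    rcases List.mem_cons.mp (ih (max x y)) with h | h
    · rw [h]
      rcases max_choice x y with hx | hy
      · rw [hx]; exact List.mem_cons_self
      · rw [hy]; exact List.mem_cons.mpr (Or.inr List.mem_cons_self)
    · exact List.mem_cons.mpr (Or.inr (List.mem_cons.mpr (Or.inr h)))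

-- B's if-scan is a foldl max over the window values
theorem pvScanMax_foldl (b : List Int) (i j : Nat) :
    pvScanMax b i j
      = ((List.range' (i + 1) (j - i)).map (fun k => b.getD k 0)).foldl max (b.getD i 0) := by
  unfold pvScanMax
  rw [List.foldl_map]
  congr 1
  funext m k
  rw [max_def]
  split_ifs <;> omega

-- the scan computes b.getD h 0 for any h that realizes the window maximum
theorem pvScanMax_eq (b : List Int) (i j h : Nat) (hij : i ≤ j) (hh1 : i ≤ h) (hh2 : h ≤ j)
    (hmax : ∀ k, i ≤ k → k ≤ j → b.getD k 0 ≤ b.getD h 0) :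
    pvScanMax b i j = b.getD h 0 := by
  rw [pvScanMax_foldl]
  set ys := (List.range' (i + 1) (j - i)).map (fun k => b.getD k 0) with hys
  have hmemC : ∀ a ∈ (b.getD i 0) :: ys, a ≤ b.getD h 0 := by
    intro a ha
    rcases List.mem_cons.mp ha with rfl | ha'
    · exact hmax i (le_refl i) hij
    · rcases List.mem_map.mp ha' with ⟨k, hk, rfl⟩
      rw [List.mem_range'_1] at hk
      exact hmax k (by omega) (by omega)
  have hin : b.getD h 0 ∈ (b.getD i 0) :: ys := by
    rcases Nat.eq_or_lt_of_le hh1 with rfl | hlt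
    · exact List.mem_cons_self
    · refine List.mem_cons.mpr (Or.inr (List.mem_map.mpr ⟨h, ?_, rfl⟩))
      rw [List.mem_range'_1]; omega
  have h1 : ys.foldl max (b.getD i 0) ≤ b.getD h 0 := hmemC _ (foldl_max_mem ys _)
  have h2 : b.getD h 0 ≤ ys.foldl max (b.getD i 0) := foldl_max_le ys _ _ hin
  omega

-- membership in pvPopBack, both directions
theorem mem_of_mem_popBack (b : List Int) (vj : Int) (pq : List Nat) :
    ∀ x ∈ pvPopBack b vj pq, x ∈ pq := by
  intro x hx
  unfold pvPopBack at hx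
  have h2 := List.Sublist.mem (List.mem_reverse.mp hx) (List.dropWhile_sublist _)
  exact List.mem_reverse.mp h2

theorem mem_popBack_of_ge (b : List Int) (vj : Int) (pq : List Nat) (x : Nat)
    (hx : x ∈ pq) (hge : vj ≤ b.getD x 0) : x ∈ pvPopBack b vj pq := by
  unfold pvPopBack
  rw [List.mem_reverse]
  exact mem_dropWhile_of_not _ _ x (List.mem_reverse.mpr hx)
    (by simp only [decide_eq_false_iff_not, not_lt]; exact hge)

theorem popBack_pairwise {r : Nat → Nat → Prop} (b : List Int) (vj : Int) (pq : List Nat)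
    (h : pq.Pairwise r) : (pvPopBack b vj pq).Pairwise r := by
  unfold pvPopBack
  rw [List.pairwise_reverse]
  exact List.Pairwise.sublist (List.dropWhile_sublist _) (List.pairwise_reverse.mpr h)

theorem popBack_ge (b : List Int) (vj : Int) (pq : List Nat)
    (h : pq.Pairwise (fun a c => b.getD c 0 ≤ b.getD a 0)) :
    ∀ x ∈ pvPopBack b vj pq, vj ≤ b.getD x 0 := by
  intro x hx
  unfold pvPopBack at hx
  have hrev : pq.reverse.Pairwise (fun a c => b.getD a 0 ≤ b.getD c 0) := by
    rw [List.pairwise_reverse]; exact h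
  have := dropWhile_all (p := fun q => decide (b.getD q 0 < vj)) pq.reverse hrev
    (by intro a c ha hr; simp only [decide_eq_false_iff_not, not_lt] at ha ⊢; omega)
    x (List.mem_reverse.mp hx)
  simp only [decide_eq_false_iff_not, not_lt] at this
  exact this

-- head of a value-nonincreasing list dominates every member
theorem headD_max (b : List Int) (pq : List Nat)
    (h : pq.Pairwise (fun a c => b.getD c 0 ≤ b.getD a 0)) :
    ∀ x ∈ pq, b.getD x 0 ≤ b.getD (pq.headD 0) 0 := by
  cases pq with
  | nil => intro x hx; cases hx
  | cons a l =>
    intro x hx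
    rcases List.pairwise_cons.mp h with ⟨ha, _⟩
    rcases List.mem_cons.mp hx with rfl | hx'
    · simp
    · simpa using ha x hx'

-- one synchronized step: B's (total, i) track A's, A's res stays j' - i', invariant preserved
theorem step_sync (b p : List Int) (pm : Int) (i j : Nat) (pq : List Nat)
    (total : Int) (hj : j < b.length) (hInv : pvInv b i j pq) :
    (pvStepB b p pm (total, i) j
        = ((pvStepA b p pm (pq, (j : Int) - (i : Int), total, i) j).2.2.1,
           (pvStepA b p pm (pq, (j : Int) - (i : Int), total, i) j).2.2.2))
    ∧ (pvStepA b p pm (pq, (j : Int) - (i : Int), total, i) j).2.1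
        = ((j : Int) + 1) - ((pvStepA b p pm (pq, (j : Int) - (i : Int), total, i) j).2.2.2 : Int)
    ∧ pvInv b (pvStepA b p pm (pq, (j : Int) - (i : Int), total, i) j).2.2.2 (j + 1)
        (pvStepA b p pm (pq, (j : Int) - (i : Int), total, i) j).1 := by
  obtain ⟨hij, hbound, hinc, hval, hcov⟩ := hInv
  set vj := b.getD j 0 with hvj
  set P := pvPopBack b vj pq with hP
  set pq' := P ++ [j] with hpq'
  have hPmem : ∀ x ∈ P, x ∈ pq := mem_of_mem_popBack b vj pq
  have hPge : ∀ x ∈ P, vj ≤ b.getD x 0 := popBack_ge b vj pq hval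
  have hbound' : ∀ q ∈ pq', i ≤ q ∧ q ≤ j := by
    intro q hq
    rcases List.mem_append.mp hq with hq | hq
    · have := hbound q (hPmem q hq); omega
    · simp at hq; omega
  have hinc' : pq'.Pairwise (· < ·) := by
    rw [hpq', List.pairwise_append]
    refine ⟨popBack_pairwise b vj pq hinc, by simp, ?_⟩
    intro a ha c hc
    simp at hc; subst hc
    exact (hbound a (hPmem a ha)).2
  have hval' : pq'.Pairwise (fun a c => b.getD c 0 ≤ b.getD a 0) := by
    rw [hpq', List.pairwise_append]
    refine ⟨popBack_pairwise b vj pq hval, by simp, ?_⟩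
    intro a ha c hc
    simp at hc; subst hc
    exact hPge a ha
  have hcov' : ∀ k, i ≤ k → k ≤ j → ∃ q ∈ pq', k ≤ q ∧ b.getD k 0 ≤ b.getD q 0 := by
    intro k hk1 hk2
    by_cases hbk : b.getD k 0 ≤ vj
    · exact ⟨j, by simp [hpq'], hk2, hbk⟩
    · have hkj : k < j := by
        rcases Nat.lt_or_ge k j with h | h
        · exact h
        · exfalso; have : k = j := by omega
          subst this; exact hbk (le_refl _)
      rcases hcov k hk1 hkj with ⟨q, hq, hkq, hbq⟩
      refine ⟨q, List.mem_append.mpr (Or.inl ?_), hkq, hbq⟩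
      exact mem_popBack_of_ge b vj pq q hq (by omega)
  have hne : pq' ≠ [] := by simp [hpq']
  set h := pq'.headD 0 with hh
  have hhmem : h ∈ pq' := by
    cases hpqe : pq' with
    | nil => exact absurd hpqe hne
    | cons a l => rw [hh, hpqe]; simp
  have hhb := hbound' h hhmem
  have hhd : ∀ x ∈ pq', b.getD x 0 ≤ b.getD h 0 := headD_max b pq' hval'
  have hwin : pvScanMax b i j = b.getD h 0 := by
    apply pvScanMax_eq b i j h hij hhb.1 hhb.2
    intro k hk1 hk2
    rcases hcov' k hk1 hk2 with ⟨q, hq, _, hbq⟩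
    exact le_trans hbq (hhd q hq)
  by_cases hc : b.getD (pq'.headD 0) 0 + (total + p.getD j 0) * ((j : Int) - (i : Int) + 1) > pm
  · have hstepA : pvStepA b p pm (pq, (j : Int) - (i : Int), total, i) j
        = (pq'.dropWhile (fun q => decide (q < i + 1)),
           max ((j : Int) - (i : Int)) ((j : Int) - ((i : Int) + 1) + 1),
           total + p.getD j 0 - p.getD i 0, i + 1) := by
      simp only [pvStepA, ← hvj, ← hP, ← hpq']
      rw [if_pos hc]
      push_cast
      ring_nf
    have hstepB : pvStepB b p pm (total, i) j
        = (total + p.getD j 0 - p.getD i 0, i + 1) := by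
      simp only [pvStepB]
      rw [hwin, hh, if_pos hc]
    refine ⟨by rw [hstepA, hstepB], ?_, ?_⟩
    · rw [hstepA]
      show max ((j : Int) - (i : Int)) ((j : Int) - ((i : Int) + 1) + 1)
          = ((j : Int) + 1) - (((i + 1 : Nat)) : Int)
      have : ((j : Int) - ((i : Int) + 1) + 1) = (j : Int) - (i : Int) := by ring
      rw [this, max_self]
      push_cast
      ring
    · rw [hstepA]
      show pvInv b (i + 1) (j + 1) (pq'.dropWhile (fun q => decide (q < i + 1)))
      set pq'' := pq'.dropWhile (fun q => decide (q < i + 1)) with hpq''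
      have hsub : ∀ x ∈ pq'', x ∈ pq' := fun x hx => (List.dropWhile_sublist _).mem hx
      have hge' : ∀ x ∈ pq'', i + 1 ≤ x := by
        intro x hx
        have := dropWhile_all (p := fun q => decide (q < i + 1)) pq' hinc'
          (by intro a c ha hr; simp at ha ⊢; omega) x hx
        simp at this; omega
      refine ⟨by omega, ?_, ?_, ?_, ?_⟩
      · intro q hq
        have h1 := hge' q hq
        have h2 := (hbound' q (hsub q hq)).2
        omega
      · exact List.Pairwise.sublist (List.dropWhile_sublist _) hinc'
      · exact List.Pairwise.sublist (List.dropWhile_sublist _) hval'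
      · intro k hk1 hk2
        rcases hcov' k (by omega) (by omega) with ⟨q, hq, hkq, hbq⟩
        refine ⟨q, ?_, hkq, hbq⟩
        exact mem_dropWhile_of_not _ _ q hq (by simp; omega)
  · have hstepA : pvStepA b p pm (pq, (j : Int) - (i : Int), total, i) j
        = (pq', max ((j : Int) - (i : Int)) ((j : Int) - (i : Int) + 1),
           total + p.getD j 0, i) := by
      simp only [pvStepA, ← hvj, ← hP, ← hpq']
      rw [if_neg hc]
    have hstepB : pvStepB b p pm (total, i) j = (total + p.getD j 0, i) := by
      simp only [pvStepB]
      rw [hwin, hh, if_neg hc]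
    refine ⟨by rw [hstepA, hstepB], ?_, ?_⟩
    · rw [hstepA]
      show max ((j : Int) - (i : Int)) ((j : Int) - (i : Int) + 1)
          = ((j : Int) + 1) - ((i : Nat) : Int)
      rw [max_eq_right (by omega)]
      ring
    · rw [hstepA]
      show pvInv b i (j + 1) pq'
      refine ⟨by omega, ?_, hinc', hval', ?_⟩
      · intro q hq; have := hbound' q hq; omega
      · intro k hk1 hk2; exact hcov' k hk1 (by omega)

-- the main loop correspondence over range' j m
theorem loop_sync (b p : List Int) (pm : Int) :
    ∀ (m j : Nat) (pq : List Nat) (total : Int) (i : Nat),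
      j + m = b.length → pvInv b i j pq →
      ((List.range' j m).foldl (pvStepA b p pm) (pq, (j : Int) - (i : Int), total, i)).2.1
        = ((j : Int) + (m : Int))
            - (((List.range' j m).foldl (pvStepB b p pm) (total, i)).2 : Int) := by
  intro m
  induction m with
  | zero =>
    intro j pq total i _ hInv
    simp
  | succ m ih =>
    intro j pq total i hlen hInv
    have hj : j < b.length := by omega
    rw [List.range'_succ, List.foldl_cons, List.foldl_cons]
    obtain ⟨heq, hres, hInv'⟩ := step_sync b p pm i j pq total hj hInv
    set sA := pvStepA b p pm (pq, (j : Int) - (i : Int), total, i) j with hsA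
    have hsplit : sA = (sA.1, sA.2.1, sA.2.2.1, sA.2.2.2) := rfl
    rw [hsplit, hres, heq]
    have : ((j : Int) + 1) - ((sA.2.2.2 : Nat) : Int)
        = ((j + 1 : Nat) : Int) - ((sA.2.2.2 : Nat) : Int) := by push_cast; ring
    rw [this]
    have hfin := ih (j + 1) sA.1 sA.2.2.1 sA.2.2.2 (by omega) hInv'
    rw [hfin]
    push_cast
    ring

-- ===== VERDICT (by name: the statement is the Claim_ definition above) =====
theorem maxPowerConsumption_spec : Claim_equal_maxPowerConsumption := by
  intro b p pm _ _
  unfold Spec_maxPowerConsumption maxPowerConsumption maxPowerConsumption_alt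
  rw [List.range_eq_range']
  have := loop_sync b p pm b.length 0 [] 0 0 (by omega)
    ⟨le_refl 0, by simp, by simp, by simp, by intro k h1 h2; omega⟩
  simpa using this
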